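-- pv_equiv track=rewrite | github.com/sattyamjjain/agent-audit-kit | agent_audit_kit/scanners/marketplace_manifest.py | _is_typosquat
-- ===== SOURCE A (Python) =====
-- _KNOWN_UPSTREAMS = frozenset(
--     {
--         "anthropic",
--         "claude",
--         "claude-code",
--         "claude-agent-sdk",
--         "mcp",
--         "model-context-protocol",
--         "langchain",
--         "langchain-core",
--         "langgraph",
--         "openai",
--         "openai-agents-sdk",
--         "gemini",
--         "google-adk",
--     }
-- )
--
-- def _edit_distance_le_1(a: str, b: str) -> bool:
--     """Return True if a and b differ by at most one insert/delete/substitute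
--     OR an adjacent transposition (Damerau-Levenshtein distance <= 1)."""
--     if a == b:
--         return False
--     if abs(len(a) - len(b)) > 1:
--         return False
--     if len(a) == len(b):
--         diffs = [i for i, (x, y) in enumerate(zip(a, b)) if x != y]
--         if len(diffs) == 1:
--             return True
--         if len(diffs) == 2 and diffs[1] == diffs[0] + 1:
--             return a[diffs[0]] == b[diffs[1]] and a[diffs[1]] == b[diffs[0]]
--         return False
--     short, long_ = (a, b) if len(a) < len(b) else (b, a)
--     for i in range(len(short)):
--         if short[i] != long_[i]:
--             return short[i:] == long_[i + 1 :]
--     return True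
--
-- def _is_typosquat(name: str) -> bool:
--     lowered = name.lower()
--     if lowered in _KNOWN_UPSTREAMS:
--         return False
--     for trusted in _KNOWN_UPSTREAMS:
--         if _edit_distance_le_1(lowered, trusted):
--             return True
--     return False
-- ===== SOURCE B (Python) =====
-- _KNOWN_UPSTREAMS = frozenset(
--     {
--         "anthropic",
--         "claude",
--         "claude-code",
--         "claude-agent-sdk",
--         "mcp",
--         "model-context-protocol",
--         "langchain",
--         "langchain-core",
--         "langgraph",
--         "openai",
--         "openai-agents-sdk",
--         "gemini",
--         "google-adk",
--     }
-- )
--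
--
-- def _one_edit_apart(a: str, b: str) -> bool:
--     """True iff a != b and one insert/delete/substitute/adjacent-transposition
--     turns a into b: skip the common prefix, then the two remainders must match
--     after one of the four possible single edits at the mismatch point."""
--     i = 0
--     while i < len(a) and i < len(b) and a[i] == b[i]:
--         i += 1
--     ra, rb = a[i:], b[i:]
--     if not ra and not rb:
--         return False  # identical strings
--     return (
--         ra[1:] == rb[1:]  # substitution (or a one-char tail insertion)
--         or ra == rb[1:]   # extra char in b
--         or ra[1:] == rb   # extra char in a
--         or (len(ra) > 1 and len(rb) > 1
--             and ra[0] == rb[1] and ra[1] == rb[0]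
--             and ra[2:] == rb[2:])  # adjacent transposition
--     )
--
--
-- def _is_typosquat(name: str) -> bool:
--     lowered = name.lower()
--     if lowered in _KNOWN_UPSTREAMS:
--         return False
--     return any(_one_edit_apart(lowered, trusted) for trusted in _KNOWN_UPSTREAMS)
-- ===== Notes on version B (the rewrite author's own statement) =====
-- stated objective: simpler
-- what changed: The inner one-edit test replaces A's three-way case analysis on lengths (a diff-index list comprehension for equal lengths, a separate short/long indexed scan otherwise) with one uniform algorithm: skip the common prefix, then decide by four suffix comparisons (substitute / insert / delete / adjacent transposition); the lowercase+membership guard and the loop over the known upstreams stay.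
import Mathlib
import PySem

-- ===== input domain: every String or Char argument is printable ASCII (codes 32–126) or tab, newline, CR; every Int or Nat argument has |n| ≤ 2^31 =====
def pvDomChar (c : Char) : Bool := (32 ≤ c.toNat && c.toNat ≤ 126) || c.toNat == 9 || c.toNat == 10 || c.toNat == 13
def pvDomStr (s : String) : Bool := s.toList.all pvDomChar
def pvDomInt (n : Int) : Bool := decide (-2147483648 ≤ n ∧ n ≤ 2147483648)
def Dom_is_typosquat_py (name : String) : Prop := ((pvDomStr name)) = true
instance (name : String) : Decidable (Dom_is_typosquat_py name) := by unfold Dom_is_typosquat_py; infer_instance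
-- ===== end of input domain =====

-- B replaces A's three-way length case analysis in the one-edit test by a single
-- common-prefix scan followed by four suffix comparisons (objective: simpler; same cost).

-- ===== PORT A =====
-- the frozenset of known upstream names (distinct elements, literal order)
def pvKnownUpstreams : List (List Char) :=
  ["anthropic".toList, "claude".toList, "claude-code".toList, "claude-agent-sdk".toList,
   "mcp".toList, "model-context-protocol".toList, "langchain".toList, "langchain-core".toList,
   "langgraph".toList, "openai".toList, "openai-agents-sdk".toList, "gemini".toList,
   "google-adk".toList]

-- [i for i, (x, y) in enumerate(zip(a, b)) if x != y]
def pvDiffIdx (a b : List Char) : List Int :=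
  ((PySem.List.enumerate (a.zip b) 0).filter (fun p => !(p.2.1 == p.2.2))).map (fun p => p.1)

-- the equal-length branch of _edit_distance_le_1, given diffs
def pvEqBranch (a b : List Char) (diffs : List Int) : Bool :=
  if PySem.List.len diffs == 1 then true
  else if PySem.List.len diffs == 2 && PySem.List.pyGetD diffs 1 0 == PySem.List.pyGetD diffs 0 0 + 1 then
    (PySem.List.pyGetD a (PySem.List.pyGetD diffs 0 0) ' ' == PySem.List.pyGetD b (PySem.List.pyGetD diffs 1 0) ' ')
      && (PySem.List.pyGetD a (PySem.List.pyGetD diffs 1 0) ' ' == PySem.List.pyGetD b (PySem.List.pyGetD diffs 0 0) ' ')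
  else false

-- 'for i in range(len(short)): if short[i] != long_[i]: return short[i:] == long_[i+1:]' / 'return True'
def pvEdLoop : List Char → List Char → Bool
  | [], _ => true
  | _ :: _, [] => true          -- unreachable: long_ is strictly longer than short
  | s :: ss, l :: ll => if s == l then pvEdLoop ss ll else (s :: ss) == ll

def pvEditDistanceLe1 (a b : List Char) : Bool :=
  if a == b then false
  else if 1 < (PySem.List.len a - PySem.List.len b).natAbs then false
  else if PySem.List.len a == PySem.List.len b then
    pvEqBranch a b (pvDiffIdx a b)
  else
    let p := if PySem.List.len a < PySem.List.len b then (a, b) else (b, a)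
    pvEdLoop p.1 p.2

-- 'for trusted in _KNOWN_UPSTREAMS: if _edit_distance_le_1(lowered, trusted): return True' / 'return False'
def pvForTrusted (low : List Char) : List (List Char) → Bool
  | [] => false
  | t :: ts => if pvEditDistanceLe1 low t then true else pvForTrusted low ts

def is_typosquat_py (name : String) : Bool :=
  let lowered := (PySem.Str.lower name).toList
  if pvKnownUpstreams.contains lowered then false
  else pvForTrusted lowered pvKnownUpstreams

-- ===== PORT B =====
-- adjacent transposition at the mismatch point
def pvTransposed (ra rb : List Char) : Bool :=
  match ra, rb with
  | x0 :: x1 :: xs, y0 :: y1 :: ys => (x0 == y1) && (x1 == y0) && (xs == ys)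
  | _, _ => false

-- the four possible single edits at the first mismatch (ra, rb: remainders after the common prefix)
def pvChecks (ra rb : List Char) : Bool :=
  match ra, rb with
  | [], [] => false             -- identical strings
  | _, _ =>
      (ra.tail == rb.tail)      -- substitution (or a one-char tail insertion)
        || (ra == rb.tail)      -- extra char in b
        || (ra.tail == rb)      -- extra char in a
        || pvTransposed ra rb   -- adjacent transposition

-- 'while i < len(a) and i < len(b) and a[i] == b[i]: i += 1' then the checks on a[i:], b[i:]
def pvOneEditApart : List Char → List Char → Bool
  | x :: xs, y :: ys => if x == y then pvOneEditApart xs ys else pvChecks (x :: xs) (y :: ys)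
  | a, b => pvChecks a b

def is_typosquat_py_alt (name : String) : Bool :=
  let lowered := (PySem.Str.lower name).toList
  if pvKnownUpstreams.contains lowered then false
  else pvKnownUpstreams.any (fun t => pvOneEditApart lowered t)

-- ===== PRECONDITION & SPEC =====
def Spec_is_typosquat_py (name : String) (out : Bool) : Prop := out = is_typosquat_py_alt name
instance (name : String) (out : Bool) : Decidable (Spec_is_typosquat_py name out) := by unfold Spec_is_typosquat_py; infer_instance

-- ===== CLAIM (what is proved, stated in full; the proofs are below) =====
def Claim_equal_is_typosquat_py : Prop := ∀ (name : String), Dom_is_typosquat_py name → Spec_is_typosquat_py name (is_typosquat_py name)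

-- ===== LEMMAS AND PROOFS =====

-- the diff-index comprehension with an arbitrary enumerate start (generalizes pvDiffIdx)
def pvDifAux (a b : List Char) (s : Int) : List Int :=
  ((PySem.List.enumerate (a.zip b) s).filter (fun p => !(p.2.1 == p.2.2))).map (fun p => p.1)

lemma pvDiffIdx_eq_aux (a b : List Char) : pvDiffIdx a b = pvDifAux a b 0 := rfl

lemma pvDifAux_nil_left (b : List Char) (s : Int) : pvDifAux [] b s = [] := rfl

lemma pvDifAux_nil_right (a : List Char) (s : Int) : pvDifAux a [] s = [] := by
  simp [pvDifAux]

lemma pvDifAux_cons (x y : Char) (a b : List Char) (s : Int) :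
    pvDifAux (x :: a) (y :: b) s =
      if x = y then pvDifAux a b (s + 1) else s :: pvDifAux a b (s + 1) := by
  simp only [pvDifAux, List.zip_cons_cons, PySem.List.enumerate_cons, List.filter_cons]
  by_cases h : x = y <;> simp [h]

lemma pvDifAux_shift (a : List Char) : ∀ (b : List Char) (s : Int),
    pvDifAux a b (s + 1) = (pvDifAux a b s).map (· + 1) := by
  induction a with
  | nil => intro b s; rfl
  | cons x a ih =>
      intro b s
      cases b with
      | nil => simp [pvDifAux_nil_right]
      | cons y b =>
          rw [pvDifAux_cons, pvDifAux_cons]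
          by_cases h : x = y <;> simp [h, ih]

lemma pvDifAux_mem_le (a : List Char) : ∀ (b : List Char) (s j : Int),
    j ∈ pvDifAux a b s → s ≤ j := by
  induction a with
  | nil => intro b s j h; simp [pvDifAux_nil_left] at h
  | cons x a ih =>
      intro b s j h
      cases b with
      | nil => simp [pvDifAux_nil_right] at h
      | cons y b =>
          rw [pvDifAux_cons] at h
          by_cases hxy : x = y
          · simp only [hxy] at h
            have := ih b (s + 1) j h
            omega
          · simp only [if_neg hxy, List.mem_cons] at h
            rcases h with h | h
            · omega
            · have := ih b (s + 1) j h
              omega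

lemma pvDifAux_nil_iff (a : List Char) : ∀ (b : List Char) (s : Int),
    a.length = b.length → (pvDifAux a b s = [] ↔ a = b) := by
  induction a with
  | nil =>
      intro b s h
      cases b with
      | nil => simp [pvDifAux_nil_left]
      | cons y b => simp at h
  | cons x a ih =>
      intro b s h
      cases b with
      | nil => simp at h
      | cons y b =>
          rw [pvDifAux_cons]
          by_cases hxy : x = y
          · simp [hxy, ih b (s + 1) (by simpa using h)]
          · simp [hxy]

-- indexing a cons at a shifted nonnegative index
lemma pyGetD_cons_add_one {α : Type} [Inhabited α] (c : α) (l : List α) (j : Int) (hj : 0 ≤ j) (d : α) :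
    PySem.List.pyGetD (c :: l) (j + 1) d = PySem.List.pyGetD l j d := by
  obtain ⟨n, rfl⟩ := Int.eq_ofNat_of_zero_le hj
  have h : ((n : Int) + 1) = ((n + 1 : Nat) : Int) := by push_cast; ring
  rw [h, PySem.List.pyGetD_natCast, PySem.List.pyGetD_natCast, List.getD_cons_succ]

-- the equal-length branch is false on three or more diff indices
lemma pvEqBranch_false_long (a b : List Char) (d0 d1 d2 : Int) (rest : List Int) :
    pvEqBranch a b (d0 :: d1 :: d2 :: rest) = false := by
  have hlen1 : (PySem.List.len (d0 :: d1 :: d2 :: rest) == 1) = false := by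
    simp [PySem.List.len_eq]; omega
  have hlen2 : (PySem.List.len (d0 :: d1 :: d2 :: rest) == 2) = false := by
    simp [PySem.List.len_eq]; omega
  simp only [pvEqBranch, hlen1, hlen2, Bool.false_and, Bool.false_eq_true, if_false]

-- the equal-length branch is invariant under dropping a shared head
lemma pvEqBranch_shift (c : Char) (a b : List Char) (D : List Int) (hmem : ∀ j ∈ D, 0 ≤ j) :
    pvEqBranch (c :: a) (c :: b) (D.map (· + 1)) = pvEqBranch a b D := by
  rcases D with _ | ⟨j, _ | ⟨k, _ | ⟨r, rest⟩⟩⟩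
  · simp [pvEqBranch]
  · simp [pvEqBranch]
  · have hj : 0 ≤ j := hmem j (by simp)
    have hk : 0 ≤ k := hmem k (by simp)
    have hadj : ((k + 1 : Int) == (j + 1) + 1) = (k == j + 1) := by
      by_cases h : k = j + 1 <;> simp [h]
    simp only [pvEqBranch, List.map_cons, List.map_nil, pysem, List.getD_cons_succ,
      List.getD_cons_zero]
    rw [hadj]
    by_cases h : k = j + 1
    · simp only [h, BEq.rfl, Bool.and_true]
      rw [pyGetD_cons_add_one c a j hj, pyGetD_cons_add_one c b j hj,
          pyGetD_cons_add_one c a (j+1) (by omega), pyGetD_cons_add_one c b (j+1) (by omega)]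
      simp
    · have hf : (k == j + 1) = false := by simp [h]
      simp [hf]
  · rw [List.map_cons, List.map_cons, List.map_cons, pvEqBranch_false_long,
      pvEqBranch_false_long]

lemma beq_false_of_length_ne {xs ys : List Char} (h : xs.length ≠ ys.length) :
    (xs == ys) = false :=
  beq_false_of_ne fun e => h (congrArg List.length e)

lemma pvTransposed_false_of_len {ra rb : List Char} (h : ra.length ≠ rb.length) :
    pvTransposed ra rb = false := by
  rcases ra with _ | ⟨x0, _ | ⟨x1, xs⟩⟩ <;> rcases rb with _ | ⟨y0, _ | ⟨y1, ys⟩⟩ <;>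
    simp [pvTransposed] at h ⊢
  intro _ _
  exact fun e => h (congrArg List.length e)

lemma pvChecks_cons (x y : Char) (xs ys : List Char) :
    pvChecks (x :: xs) (y :: ys) =
      ((xs == ys) || ((x :: xs) == ys) || (xs == (y :: ys)) || pvTransposed (x :: xs) (y :: ys)) := by
  simp [pvChecks]

-- A's cons-cons step with equal heads reduces to the tails
lemma edA_cons_cons (c : Char) (a b : List Char) :
    pvEditDistanceLe1 (c :: a) (c :: b) = pvEditDistanceLe1 a b := by
  by_cases hab : a = b
  · subst hab; simp [pvEditDistanceLe1]
  · have h1 : ((c :: a) == (c :: b)) = false := by simp [hab]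
    have h1' : (a == b) = false := by simp [hab]
    simp only [pvEditDistanceLe1, h1, h1', PySem.List.len_eq, List.length_cons,
      Bool.false_eq_true, if_false]
    have hsub : (((a.length + 1 : Nat) : Int) - ((b.length + 1 : Nat) : Int)) =
        ((a.length : Int) - (b.length : Int)) := by push_cast; ring
    rw [hsub]
    by_cases h2 : 1 < ((a.length : Int) - (b.length : Int)).natAbs
    · simp [h2]
    · simp only [h2, if_false]
      by_cases h3 : a.length = b.length
      · have hc : (((a.length + 1 : Nat) : Int) == ((b.length + 1 : Nat) : Int)) = true := by
          simp [h3]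
        have hc' : (((a.length : Nat) : Int) == ((b.length : Nat) : Int)) = true := by simp [h3]
        simp only [hc, hc', if_true]
        rw [pvDiffIdx_eq_aux, pvDiffIdx_eq_aux, pvDifAux_cons, if_pos rfl, pvDifAux_shift]
        exact pvEqBranch_shift c a b _ (fun j hj => pvDifAux_mem_le a b 0 j hj)
      · have hc : (((a.length + 1 : Nat) : Int) == ((b.length + 1 : Nat) : Int)) = false := by
          simp [h3]
        have hc' : (((a.length : Nat) : Int) == ((b.length : Nat) : Int)) = false := by simp [h3]
        simp only [hc, hc', Bool.false_eq_true, if_false]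
        have hlt : (((a.length + 1 : Nat) : Int) < ((b.length + 1 : Nat) : Int)) ↔
            (((a.length : Nat) : Int) < ((b.length : Nat) : Int)) := by push_cast; omega
        by_cases h4 : ((a.length : Nat) : Int) < ((b.length : Nat) : Int)
      
        · simp only [if_pos (hlt.mpr h4), if_pos h4]
          simp [pvEdLoop]
        · simp only [if_neg (fun h => h4 (hlt.mp h)), if_neg h4]
          simp [pvEdLoop]

-- the equal-length branch on a one-element diff list is true
lemma pvEqBranch_singleton (a b : List Char) (d : Int) : pvEqBranch a b [d] = true := by
  simp [pvEqBranch]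

-- the equal-length branch is false when the first two diffs are not adjacent (or there are > 2)
lemma pvEqBranch_false_of (a b : List Char) (d0 d1 : Int) (rest : List Int)
    (h : rest = [] → d1 ≠ d0 + 1) : pvEqBranch a b (d0 :: d1 :: rest) = false := by
  rcases rest with _ | ⟨r, rs⟩
  · have hne : (d1 == d0 + 1) = false := by simp [h rfl]
    simp [pvEqBranch, pysem, hne]
  · exact pvEqBranch_false_long a b d0 d1 r rs

-- A's result at a head mismatch equals B's four checks
lemma edA_ne (x y : Char) (hxy : x ≠ y) (xs ys : List Char) :
    pvEditDistanceLe1 (x :: xs) (y :: ys) = pvChecks (x :: xs) (y :: ys) := by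
  have h1 : ((x :: xs) == (y :: ys)) = false := by simp [hxy]
  rw [pvChecks_cons]
  simp only [pvEditDistanceLe1, h1, Bool.false_eq_true, if_false, PySem.List.len_eq,
    List.length_cons]
  by_cases heq : xs.length = ys.length
  · -- equal lengths: A takes the diffs branch
    have h2 : ¬ 1 < (((xs.length + 1 : Nat) : Int) - ((ys.length + 1 : Nat) : Int)).natAbs := by
      omega
    have hc : (((xs.length + 1 : Nat) : Int) == ((ys.length + 1 : Nat) : Int)) = true := by
      simp [heq]
    simp only [if_neg h2, hc, if_true]
    rw [pvDiffIdx_eq_aux, pvDifAux_cons, if_neg hxy, pvDifAux_shift]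
    have hB1 : ((x :: xs) == ys) = false :=
      beq_false_of_length_ne (by simp; omega)
    have hB2 : (xs == (y :: ys)) = false :=
      beq_false_of_length_ne (by simp; omega)
    rw [hB1, hB2]
    simp only [Bool.or_false]
    cases xs with
    | nil =>
        cases ys with
        | nil => simp [pvDifAux_nil_left, pvEqBranch_singleton, pvTransposed]
        | cons y1 ys' => simp at heq
    | cons x1 xs' =>
        cases ys with
        | nil => simp at heq
        | cons y1 ys' =>
            have hlen' : xs'.length = ys'.length := by simpa using heq
            rw [pvDifAux_cons]
            by_cases h11 : x1 = y1
            · subst h11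
              rw [if_pos rfl, pvDifAux_shift]
              by_cases h2' : xs' = ys'
              · rw [(pvDifAux_nil_iff xs' ys' 0 hlen').mpr h2']
                simp [pvEqBranch_singleton, h2']
              · have hD : pvDifAux xs' ys' 0 ≠ [] :=
                  fun e => h2' ((pvDifAux_nil_iff xs' ys' 0 hlen').mp e)
                rcases hDex : pvDifAux xs' ys' 0 with _ | ⟨j, rest⟩
                · exact absurd hDex hD
                · have hj : 0 ≤ j := pvDifAux_mem_le xs' ys' 0 j (by rw [hDex]; simp)
                  simp only [List.map_cons]
                  rw [pvEqBranch_false_of _ _ 0 (j + 1 + 1) _ (fun _ => by omega)]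
                  have hxy' : (xs' == ys') = false := by simp [h2']
                  have htr : pvTransposed (x :: x1 :: xs') (y :: x1 :: ys') = false := by
                    simp [pvTransposed, hxy']
                  simp [htr, hxy']
            · rw [if_neg h11, pvDifAux_shift]
              by_cases h2' : xs' = ys'
              · subst h2'
                rw [(pvDifAux_nil_iff xs' xs' 0 rfl).mpr rfl]
                simp only [List.map_nil, List.map_cons]
                have hlhs : pvEqBranch (x :: x1 :: xs') (y :: y1 :: xs') [0, 0 + 1] =
                    ((x == y1) && (x1 == y)) := by
                  simp [pvEqBranch, pysem]
                rw [hlhs]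
                have hne : ((x1 :: xs') == (y1 :: xs')) = false := by simp [h11]
                simp [hne, pvTransposed]
              · have hD : pvDifAux xs' ys' 0 ≠ [] :=
                  fun e => h2' ((pvDifAux_nil_iff xs' ys' 0 hlen').mp e)
                rcases hDex : pvDifAux xs' ys' 0 with _ | ⟨j, rest⟩
                · exact absurd hDex hD
                · simp only [List.map_cons]
                  rw [pvEqBranch_false_of _ _ 0 (0 + 1) _ (fun e => by simp at e)]
                  have hxy' : (xs' == ys') = false := by simp [h2']
                  have hne : ((x1 :: xs') == (y1 :: ys')) = false := by simp [h11]
                  simp [hne, pvTransposed, hxy']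
  · -- unequal lengths
    by_cases hplus : ys.length = xs.length + 1
    · -- b is longer by one
      have h2 : ¬ 1 < (((xs.length + 1 : Nat) : Int) - ((ys.length + 1 : Nat) : Int)).natAbs := by
        omega
      have hc : (((xs.length + 1 : Nat) : Int) == ((ys.length + 1 : Nat) : Int)) = false := by
        simp [heq]
      have hlt : (((xs.length + 1 : Nat) : Int) < ((ys.length + 1 : Nat) : Int)) := by
        push_cast; omega
      simp only [if_neg h2, hc, Bool.false_eq_true, if_false, if_pos hlt]
      have hloop : pvEdLoop (x :: xs) (y :: ys) = ((x :: xs) == ys) := by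
        simp [pvEdLoop, hxy]
      have hB0 : (xs == ys) = false := beq_false_of_length_ne (by omega)
      have hB2 : (xs == (y :: ys)) = false := beq_false_of_length_ne (by simp; omega)
      have htr : pvTransposed (x :: xs) (y :: ys) = false :=
        pvTransposed_false_of_len (by simp; omega)
      simp [hloop, hB0, hB2, htr]
    · by_cases hminus : xs.length = ys.length + 1
      · -- a is longer by one
        have h2 : ¬ 1 < (((xs.length + 1 : Nat) : Int) - ((ys.length + 1 : Nat) : Int)).natAbs := by
          omega
        have hc : (((xs.length + 1 : Nat) : Int) == ((ys.length + 1 : Nat) : Int)) = false := by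
          simp [heq]
        have hlt : ¬ (((xs.length + 1 : Nat) : Int) < ((ys.length + 1 : Nat) : Int)) := by
          push_cast; omega
        simp only [if_neg h2, hc, Bool.false_eq_true, if_false, if_neg hlt]
        have hloop : pvEdLoop (y :: ys) (x :: xs) = ((y :: ys) == xs) := by
          simp [pvEdLoop, Ne.symm hxy]
        have hB0 : (xs == ys) = false := beq_false_of_length_ne (by omega)
        have hB1 : ((x :: xs) == ys) = false := beq_false_of_length_ne (by simp; omega)
        have htr : pvTransposed (x :: xs) (y :: ys) = false :=
          pvTransposed_false_of_len (by simp; omega)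
        simp [hloop, hB0, hB1, htr, Bool.beq_comm]
      · -- lengths differ by at least two: both sides are false
        have h2 : 1 < (((xs.length + 1 : Nat) : Int) - ((ys.length + 1 : Nat) : Int)).natAbs := by
          omega
        simp only [if_pos h2]
        have hB0 : (xs == ys) = false := beq_false_of_length_ne (by omega)
        have hB1 : ((x :: xs) == ys) = false := beq_false_of_length_ne (by simp; omega)
        have hB2 : (xs == (y :: ys)) = false := beq_false_of_length_ne (by simp; omega)
        have htr : pvTransposed (x :: xs) (y :: ys) = false :=
          pvTransposed_false_of_len (by simp; omega)
        simp [hB0, hB1, hB2, htr]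

-- the central lemma: A's one-edit test equals B's
lemma ed_eq (a : List Char) : ∀ b : List Char, pvEditDistanceLe1 a b = pvOneEditApart a b := by
  induction a with
  | nil =>
      intro b
      cases b with
      | nil => rfl
      | cons y ys =>
          cases ys with
          | nil => simp [pvEditDistanceLe1, pvOneEditApart, pvChecks, pvEdLoop,
              pvTransposed, PySem.List.len_eq]
          | cons z zs =>
              simp [pvEditDistanceLe1, pvOneEditApart, pvChecks, pvTransposed,
                PySem.List.len_eq]
              omega
  | cons x xs ih =>
      intro b
      cases b with
      | nil =>
          cases xs with
          | nil => simp [pvEditDistanceLe1, pvOneEditApart, pvChecks, pvEdLoop,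
              pvTransposed, PySem.List.len_eq]
          | cons z zs =>
              simp [pvEditDistanceLe1, pvOneEditApart, pvChecks, pvTransposed,
                PySem.List.len_eq]
              omega
      | cons y ys =>
          by_cases hxy : x = y
          · subst hxy
            rw [edA_cons_cons]
            simpa [pvOneEditApart] using ih ys
          · rw [edA_ne x y hxy]
            simp [pvOneEditApart, hxy]

lemma forTrusted_eq_any (low : List Char) (ts : List (List Char)) :
    pvForTrusted low ts = ts.any (fun t => pvOneEditApart low t) := by
  induction ts with
  | nil => rfl
  | cons t ts ih =>
      simp only [pvForTrusted, List.any_cons, ed_eq low t, ih]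
      cases pvOneEditApart low t <;> simp

-- ===== VERDICT (by name: the statement is the Claim_ definition above) =====
theorem is_typosquat_py_spec : Claim_equal_is_typosquat_py := by
  intro name _
  unfold Spec_is_typosquat_py is_typosquat_py is_typosquat_py_alt
  simp only [forTrusted_eq_any]
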